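-- pv_equiv track=rewrite | github.com/SchmidtCode/rackpatch | telegram/bot.py | parse_failure_context
-- ===== SOURCE A (Python) =====
-- def parse_failure_context(stdout: str, stderr: str) -> list[str]:
--     tail = stderr.strip() or stdout.strip()
--     if not tail:
--         return []
--     lines = tail.splitlines()
--     failed_task = ""
--     for index, line in enumerate(lines):
--         if "FAILED!" in line:
--             for reverse_index in range(index, -1, -1):
--                 if lines[reverse_index].startswith("TASK ["):
--                     failed_task = lines[reverse_index]
--                     break
--             break
--     summary: list[str] = []
--     if failed_task:
--         summary.append(failed_task)
--     summary.extend(lines[-10:])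
--     return summary
-- ===== SOURCE B (Python) =====
-- def parse_failure_context(stdout: str, stderr: str) -> list[str]:
--     tail = stderr.strip() or stdout.strip()
--     if not tail:
--         return []
--     lines = tail.splitlines()
--     failed_task = ""
--     last_task = ""
--     for line in lines:
--         if line.startswith("TASK ["):
--             last_task = line
--         if "FAILED!" in line:
--             failed_task = last_task
--             break
--     summary: list[str] = []
--     if failed_task:
--         summary.append(failed_task)
--     summary.extend(lines[-10:])
--     return summary
-- ===== Notes on version B (the rewrite author's own statement) =====
-- stated objective: simpler
-- what changed: A's nested backward rescan for the nearest preceding 'TASK [' line is replaced by a single forward pass that keeps the most recent TASK line as running state.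
import Mathlib
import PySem

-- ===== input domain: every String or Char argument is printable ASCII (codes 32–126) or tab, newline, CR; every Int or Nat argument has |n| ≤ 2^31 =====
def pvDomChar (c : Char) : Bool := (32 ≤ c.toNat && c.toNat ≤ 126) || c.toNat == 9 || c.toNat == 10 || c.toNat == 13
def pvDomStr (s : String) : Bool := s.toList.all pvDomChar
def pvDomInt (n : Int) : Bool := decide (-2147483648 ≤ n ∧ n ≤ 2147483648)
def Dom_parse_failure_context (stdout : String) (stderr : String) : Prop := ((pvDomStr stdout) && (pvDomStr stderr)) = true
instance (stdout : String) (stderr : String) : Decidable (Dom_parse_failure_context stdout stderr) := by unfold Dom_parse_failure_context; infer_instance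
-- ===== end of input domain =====

-- B replaces A's backward rescan for the preceding "TASK [" line by one forward pass that
-- keeps the most recent TASK line as running state (objective: simpler, one loop instead of nested scans).

-- ===== PORT A =====
-- inner loop: for reverse_index in range(index, -1, -1): if lines[reverse_index].startswith("TASK ["): return it; else ""
def pvAInner (lines : List String) : Nat → String
  | 0 => if PySem.Str.startswith (lines.getD 0 "") "TASK [" then lines.getD 0 "" else ""
  | (i+1) =>
    if PySem.Str.startswith (lines.getD (i+1) "") "TASK [" then lines.getD (i+1) ""
    else pvAInner lines i

-- outer loop: for index, line in enumerate(lines): if "FAILED!" in line: <inner>; break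
def pvAOuter (lines : List String) : List String → Nat → String
  | [], _ => ""
  | l :: ls, index =>
    if PySem.Str.isIn "FAILED!" l then pvAInner lines index
    else pvAOuter lines ls (index + 1)

def parse_failure_context (stdout : String) (stderr : String) : List String :=
  let tail := if PySem.Str.strip stderr ≠ "" then PySem.Str.strip stderr else PySem.Str.strip stdout
  if tail = "" then []
  else
    let lines := PySem.Str.splitlines tail
    let failed_task := pvAOuter lines lines 0
    let summary : List String := if failed_task ≠ "" then [failed_task] else []
    summary ++ PySem.List.slice lines (some (-10)) none

-- ===== PORT B =====
-- single forward pass: update last_task, then break with failed_task = last_task at first FAILED!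
def pvBScan (last : String) : List String → String
  | [] => ""
  | l :: ls =>
    let last' := if PySem.Str.startswith l "TASK [" then l else last
    if PySem.Str.isIn "FAILED!" l then last' else pvBScan last' ls

def parse_failure_context_alt (stdout : String) (stderr : String) : List String :=
  let tail := if PySem.Str.strip stderr ≠ "" then PySem.Str.strip stderr else PySem.Str.strip stdout
  if tail = "" then []
  else
    let lines := PySem.Str.splitlines tail
    let failed_task := pvBScan "" lines
    let summary : List String := if failed_task ≠ "" then [failed_task] else []
    summary ++ PySem.List.slice lines (some (-10)) none

-- ===== PRECONDITION & SPEC =====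
def Spec_parse_failure_context (stdout : String) (stderr : String) (out : List String) : Prop := out = parse_failure_context_alt stdout stderr
instance (stdout : String) (stderr : String) (out : List String) : Decidable (Spec_parse_failure_context stdout stderr out) := by unfold Spec_parse_failure_context; infer_instance

-- ===== CLAIM (what is proved, stated in full; the proofs are below) =====
def Claim_equal_parse_failure_context : Prop := ∀ (stdout : String) (stderr : String), Dom_parse_failure_context stdout stderr → Spec_parse_failure_context stdout stderr (parse_failure_context stdout stderr)

-- ===== LEMMAS AND PROOFS =====

-- the "last TASK line seen before index i" that B carries as state
def pvPrev (lines : List String) : Nat → String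
  | 0 => ""
  | (i+1) => pvAInner lines i

lemma pvGetD_of_drop {lines ls : List String} {l : String} {i : Nat}
    (h : lines.drop i = l :: ls) : lines[i]? = some l := by
  rw [← List.head?_drop, h]; rfl

lemma pvScan_eq (lines : List String) :
    ∀ n i, lines.length - i = n →
      pvBScan (pvPrev lines i) (lines.drop i) = pvAOuter lines (lines.drop i) i := by
  intro n
  induction n with
  | zero =>
    intro i h
    have : lines.drop i = [] := by
      apply List.drop_eq_nil_of_le; omega
    simp [this, pvBScan, pvAOuter]
  | succ n ih =>
    intro i h
    cases hd : lines.drop i with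
    | nil => simp [pvBScan, pvAOuter]
    | cons l ls =>
      have hget : lines[i]? = some l := pvGetD_of_drop hd
      have hls : lines.drop (i+1) = ls := by
        rw [← List.tail_drop, hd]
        rfl
      have hlast : (if PySem.Str.startswith l "TASK [" then l else pvPrev lines i)
          = pvAInner lines i := by
        cases i with
        | zero => simp [pvPrev, pvAInner, List.getD, hget]
        | succ k => simp [pvPrev, pvAInner, List.getD, hget]
      simp only [pvBScan, pvAOuter]
      rw [hlast]
      split_ifs with hf
      · rfl
      · have hrec := ih (i+1) (by omega)
        rw [hls] at hrec
        simpa [pvPrev] using hrec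

lemma pvScan_main (lines : List String) : pvBScan "" lines = pvAOuter lines lines 0 := by
  have := pvScan_eq lines lines.length 0 (by omega)
  simpa [pvPrev] using this

-- ===== VERDICT (by name: the statement is the Claim_ definition above) =====
theorem parse_failure_context_spec : Claim_equal_parse_failure_context := by
  intro stdout stderr _
  unfold Spec_parse_failure_context parse_failure_context parse_failure_context_alt
  simp only [pvScan_main]
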